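-- pv_equiv track=rewrite | github.com/vtombou/info-f308 | ChristofidesSolver.py | halmiton_euler
-- ===== SOURCE A (Python) =====
-- def halmiton_euler(list_sommets):
--     """
--     Cette fonction prend en paramètre une liste de sommets d'un circuit d'euler et retourne la
--     liste de sommets du circuit Hamiltonien associé
--     :param list_sommets:
--     :return:
--     """
--     if list_sommets != -1:
--         hamilton, visites = [], []
--         for i in range(0, len(list_sommets)):
--             if list_sommets[i] not in visites or i == len(list_sommets) - 1:
--                 visites.append(list_sommets[i])
--                 hamilton.append(list_sommets[i])
--         return hamilton
--     else:
--         return -1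
-- ===== SOURCE B (Python) =====
-- def halmiton_euler(list_sommets):
--     # head-and-filter worklist: repeatedly emit the head of the remaining
--     # worklist and delete all its other copies from it (no visited set)
--     if list_sommets != -1:
--         if not list_sommets:
--             return []
--         out = []
--         rest = list_sommets[:-1]
--         while rest:
--             head = rest[0]
--             out.append(head)
--             rest = [y for y in rest[1:] if y != head]
--         return out + [list_sommets[-1]]
--     else:
--         return -1
-- ===== Notes on version B (the rewrite author's own statement) =====
-- stated objective: alternative
-- what changed: Replaces A's index loop with a maintained visited list and an OR-condition on the last index by a head-and-filter worklist loop (emit the head of the remaining worklist, delete its other copies from it) applied to all but the last vertex, with the final vertex appended unconditionally.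
import Mathlib
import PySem

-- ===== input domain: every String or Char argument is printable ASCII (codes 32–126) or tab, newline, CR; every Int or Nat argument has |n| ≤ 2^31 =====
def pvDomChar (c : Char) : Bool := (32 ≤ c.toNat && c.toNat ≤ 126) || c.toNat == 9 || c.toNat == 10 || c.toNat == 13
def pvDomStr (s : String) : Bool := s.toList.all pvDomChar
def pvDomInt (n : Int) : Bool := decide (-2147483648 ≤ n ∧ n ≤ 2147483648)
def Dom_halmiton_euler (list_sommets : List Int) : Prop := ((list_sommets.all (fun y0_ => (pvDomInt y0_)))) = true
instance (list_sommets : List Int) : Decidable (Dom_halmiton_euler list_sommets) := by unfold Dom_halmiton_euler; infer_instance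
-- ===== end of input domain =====

-- B replaces A's index loop (visited list + OR-condition on the last index) by a
-- head-and-filter worklist loop on all-but-last (emit the head, delete its other
-- copies), then a forced append of the last vertex; objective: alternative, not faster.
-- (Python A's `list_sommets != -1` guard can never fail on a list argument, so it
--  vanishes under the List Int type; both ports keep the list branch only.)

-- ===== PORT A =====
-- loop over i in range(0, len), state (hamilton, visites); exact transliteration
-- (pyGetD is exact here: every i drawn from the range is in bounds).
def halmiton_euler (list_sommets : List Int) : List Int :=
  let n : Int := PySem.List.len list_sommets
  ((PySem.List.pyRange 0 n 1).foldl
      (fun (st : List Int × List Int) i =>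
        let x := PySem.List.pyGetD list_sommets i 0
        if x ∉ st.2 ∨ i = n - 1 then (st.1 ++ [x], st.2 ++ [x]) else st)
      ([], [])).1

-- ===== PORT B =====
-- the while loop: out accumulates, rest is the shrinking worklist.
def pvStripLoop : List Int → List Int → List Int
  | out, [] => out
  | out, h :: t => pvStripLoop (out ++ [h]) (t.filter (fun y => y ≠ h))
termination_by _ rest => rest.length
decreasing_by
  simp
  exact le_trans (List.length_filter_le _ _) (by simp)

def halmiton_euler_alt (list_sommets : List Int) : List Int :=
  if list_sommets = [] then []
  else
    pvStripLoop [] (PySem.List.slice list_sommets none (some (-1)))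
      ++ [PySem.List.pyGetD list_sommets (-1) 0]

-- ===== PRECONDITION & SPEC =====
def Spec_halmiton_euler (list_sommets : List Int) (out : List Int) : Prop := out = halmiton_euler_alt list_sommets
instance (list_sommets : List Int) (out : List Int) : Decidable (Spec_halmiton_euler list_sommets out) := by unfold Spec_halmiton_euler; infer_instance

-- ===== CLAIM (what is proved, stated in full; the proofs are below) =====
def Claim_equal_halmiton_euler : Prop := ∀ (list_sommets : List Int), Dom_halmiton_euler list_sommets → Spec_halmiton_euler list_sommets (halmiton_euler list_sommets)

-- ===== LEMMAS AND PROOFS =====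

-- set(l) filtered and filtering l first agree (for the "≠ x" filter).
theorem pv_ofList_filter (l : List Int) (x : Int) :
    PySem.Set.ofList (l.filter (fun y => y ≠ x))
      = PySem.Set.discard (PySem.Set.ofList l) x := by
  induction l with
  | nil => rfl
  | cons y t ih =>
    by_cases hy : y = x
    · subst hy
      rw [List.filter_cons_of_neg (by simp), ih, PySem.Set.ofList_cons]
      simp [PySem.Set.discard, List.filter_filter]
    · rw [List.filter_cons_of_pos (by simpa using hy),
        PySem.Set.ofList_cons, PySem.Set.ofList_cons, ih]
      simp only [PySem.Set.discard, List.filter_cons, List.filter_filter]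
      simp [hy, Bool.and_comm]

-- the head-and-filter recursion computes the order-preserving dedup.
theorem pvStripLoop_cons (out : List Int) (h : Int) (t : List Int) :
    pvStripLoop out (h :: t) = pvStripLoop (out ++ [h]) (t.filter (fun y => y ≠ h)) := by
  rw [pvStripLoop.eq_def]

-- the worklist loop computes the order-preserving dedup of its worklist.
theorem pv_strip_eq : ∀ (out l : List Int), pvStripLoop out l = out ++ PySem.List.dedup l
  | out, [] => by rw [pvStripLoop.eq_def]; simp [PySem.List.dedup, PySem.Set.ofList]
  | out, h :: t => by
    rw [pvStripLoop_cons, pv_strip_eq (out ++ [h]) (t.filter (fun y => y ≠ h)),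
      PySem.List.dedup_eq_ofList, PySem.List.dedup_eq_ofList,
      pv_ofList_filter, PySem.Set.ofList_cons]
    simp
termination_by _ l => l.length
decreasing_by
  simp
  exact le_trans (List.length_filter_le _ _) (by simp)

-- The dedup fold with equal components tracks Set.add on a single list.
theorem pv_foldl_pair (ys : List Int) (s : List Int) :
    ys.foldl (fun (st : List Int × List Int) x =>
        if x ∉ st.2 then (st.1 ++ [x], st.2 ++ [x]) else st) (s, s)
      = (ys.foldl PySem.Set.add s, ys.foldl PySem.Set.add s) := by
  induction ys generalizing s with
  | nil => rfl
  | cons y ys ih =>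
    rw [List.foldl_cons, List.foldl_cons]
    by_cases h : y ∈ s
    · rw [if_neg (by simp [h]),
        show PySem.Set.add s y = s by simp [PySem.Set.add, PySem.Set.contains, h]]
      exact ih s
    · rw [if_pos (by simp [h]),
        show PySem.Set.add s y = s ++ [y] by simp [PySem.Set.add, PySem.Set.contains, h]]
      exact ih (s ++ [y])

-- A's loop over the prefix indices behaves as the element-wise dedup fold.
theorem pv_prefix_fold (ys : List Int) (z : Int) :
    (PySem.List.pyRange 0 (ys.length : Int) 1).foldl
        (fun (st : List Int × List Int) i =>
          let x := PySem.List.pyGetD (ys ++ [z]) i 0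
          if x ∉ st.2 ∨ i = (ys.length : Int) then (st.1 ++ [x], st.2 ++ [x]) else st)
        ([], [])
      = (PySem.List.dedup ys, PySem.List.dedup ys) := by
  have hcongr : (PySem.List.pyRange 0 (ys.length : Int) 1).foldl
      (fun (st : List Int × List Int) i =>
        let x := PySem.List.pyGetD (ys ++ [z]) i 0
        if x ∉ st.2 ∨ i = (ys.length : Int) then (st.1 ++ [x], st.2 ++ [x]) else st)
      ([], [])
    = (PySem.List.pyRange 0 (ys.length : Int) 1).foldl
      (fun (st : List Int × List Int) i =>
        let x := PySem.List.pyGetD ys i 0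
        if x ∉ st.2 then (st.1 ++ [x], st.2 ++ [x]) else st)
      ([], []) := by
    apply PySem.List.foldl_congr_mem
    intro acc i hi
    have hmem := (PySem.List.mem_pyRange_one).1 hi
    have hne : i ≠ (ys.length : Int) := by omega
    have hget : PySem.List.pyGetD (ys ++ [z]) i 0 = PySem.List.pyGetD ys i 0 := by
      rw [PySem.List.pyGetD_eq_getElem _ _ hmem.1 (by simp; omega),
          PySem.List.pyGetD_eq_getElem _ _ hmem.1 (by omega)]
      rw [List.getElem_append_left]
    simp only [hget, hne, or_false]
  rw [hcongr]
  rw [PySem.List.foldl_pyRange_zero_pyGetD' ys 0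
    (fun (st : List Int × List Int) x =>
      if x ∉ st.2 then (st.1 ++ [x], st.2 ++ [x]) else st) ([], [])]
  rw [pv_foldl_pair ys []]
  rw [PySem.List.dedup_eq_ofList, PySem.Set.ofList_eq_foldl]

-- ===== VERDICT (by name: the statement is the Claim_ definition above) =====
theorem halmiton_euler_spec : Claim_equal_halmiton_euler := by
  intro xs _
  unfold Spec_halmiton_euler halmiton_euler halmiton_euler_alt
  rcases List.eq_nil_or_concat xs with rfl | ⟨ys, z, rfl⟩
  · rfl
  · have hne : ys ++ [z] ≠ [] := by simp
    simp only [List.concat_eq_append, if_neg hne, PySem.List.len_eq]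
    have hlen : ((ys ++ [z]).length : Int) = (ys.length : Int) + 1 := by simp
    rw [hlen]
    rw [PySem.List.pyRange_one_succ_right (by positivity)]
    rw [List.foldl_append]
    have hsub : (ys.length : Int) + 1 - 1 = (ys.length : Int) := by ring
    simp only [hsub]
    rw [pv_prefix_fold ys z]
    have hgetz : PySem.List.pyGetD (ys ++ [z]) (ys.length : Int) 0 = z := by
      rw [PySem.List.pyGetD_natCast]
      simp [List.getD]
    rw [List.foldl_cons, List.foldl_nil]
    simp only [hgetz, or_true, if_pos]
    rw [pv_strip_eq, List.nil_append, PySem.List.slice_to_neg_one, List.dropLast_concat,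
        PySem.List.pyGetD_neg_one_append_singleton]
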